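-- pv_equiv track=rewrite | github.com/Adracir/migration_im_bundestag | visualizations.py | skip_some_vals
-- ===== SOURCE A (Python) =====
-- def skip_some_vals(x, y, val_to_skip=1000):
--     x_segments = []
--     y_segments = []
--     current_segment_x = []
--     current_segment_y = []
--     for xi, yi in zip(x, y):
--         if yi != val_to_skip:
--             current_segment_x.append(xi)
--             current_segment_y.append(yi)
--         else:
--             if current_segment_x:
--                 x_segments.append(current_segment_x)
--                 y_segments.append(current_segment_y)
--             current_segment_x = []
--             current_segment_y = []
--     if current_segment_x:
--         x_segments.append(current_segment_x)
--         y_segments.append(current_segment_y)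
--     return [x_segments, y_segments]
-- ===== SOURCE B (Python) =====
-- from itertools import groupby
--
--
-- def skip_some_vals(x, y, val_to_skip=1000):
--     x_segments = []
--     y_segments = []
--     for keep, group in groupby(zip(x, y), key=lambda pair: pair[1] != val_to_skip):
--         if keep:
--             xs, ys = zip(*group)
--             x_segments.append(list(xs))
--             y_segments.append(list(ys))
--     return [x_segments, y_segments]
-- ===== Notes on version B (the rewrite author's own statement) =====
-- stated objective: idiomatic
-- what changed: Replaces the manual current-segment accumulator with itertools.groupby keyed on yi != val_to_skip: kept groups are unzipped into segments, dropped groups filtered out, so there is no mutable segment state and no end-of-loop flush.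
import Mathlib
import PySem

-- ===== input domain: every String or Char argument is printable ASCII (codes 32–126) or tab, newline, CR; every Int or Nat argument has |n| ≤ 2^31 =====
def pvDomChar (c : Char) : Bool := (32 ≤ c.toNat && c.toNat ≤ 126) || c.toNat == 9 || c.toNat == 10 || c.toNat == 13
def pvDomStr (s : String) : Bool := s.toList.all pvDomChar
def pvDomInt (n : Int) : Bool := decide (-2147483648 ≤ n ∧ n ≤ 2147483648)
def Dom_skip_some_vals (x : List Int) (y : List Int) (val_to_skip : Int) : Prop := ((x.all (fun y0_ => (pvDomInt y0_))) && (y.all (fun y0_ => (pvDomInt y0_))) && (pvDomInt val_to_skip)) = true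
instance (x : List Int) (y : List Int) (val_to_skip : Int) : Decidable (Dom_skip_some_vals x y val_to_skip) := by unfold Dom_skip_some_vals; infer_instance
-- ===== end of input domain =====

-- B replaces A's manual current-segment accumulator and end-of-loop flush by grouping
-- the zipped pairs into maximal runs keyed on (yi != val_to_skip) and keeping the runs
-- whose key is true (itertools.groupby in Source B); objective: more idiomatic, same cost.

-- ===== PORT A =====
-- A's for-loop over zip(x, y) with its four mutable accumulators, as structural recursion.
def skipLoopA (v : Int) : List (Int × Int) → List (List Int) → List (List Int) → List Int → List Int → List (List (List Int))
  | [], xs, ys, cx, cy => if cx ≠ [] then [xs ++ [cx], ys ++ [cy]] else [xs, ys]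
  | (a, b) :: t, xs, ys, cx, cy =>
    if b ≠ v then skipLoopA v t xs ys (cx ++ [a]) (cy ++ [b])
    else if cx ≠ [] then skipLoopA v t (xs ++ [cx]) (ys ++ [cy]) [] []
    else skipLoopA v t xs ys [] []

def skip_some_vals (x : List Int) (y : List Int) (val_to_skip : Int) : List (List (List Int)) :=
  skipLoopA val_to_skip (x.zip y) [] [] [] []

-- ===== PORT B =====
-- Hand port of itertools.groupby: splits a list into maximal runs of equal key
-- (exact: groupby yields (key, run) for each maximal run of consecutive equal keys).
def groupRuns (key : Int × Int → Bool) : List (Int × Int) → List (Bool × List (Int × Int))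
  | [] => []
  | p :: ps =>
    (key p, p :: ps.takeWhile (fun q => key q == key p)) ::
      groupRuns key (ps.dropWhile (fun q => key q == key p))
termination_by zs => zs.length
decreasing_by simpa using Nat.lt_succ_of_le (List.length_dropWhile_le _ _)

def skip_some_vals_alt (x : List Int) (y : List Int) (val_to_skip : Int) : List (List (List Int)) :=
  let kept := (groupRuns (fun p => p.2 != val_to_skip) (x.zip y)).filter (fun g => g.1)
  [kept.map (fun g => g.2.map Prod.fst), kept.map (fun g => g.2.map Prod.snd)]

-- ===== PRECONDITION & SPEC =====
def Spec_skip_some_vals (x : List Int) (y : List Int) (val_to_skip : Int) (out : List (List (List Int))) : Prop := out = skip_some_vals_alt x y val_to_skip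
instance (x : List Int) (y : List Int) (val_to_skip : Int) (out : List (List (List Int))) : Decidable (Spec_skip_some_vals x y val_to_skip out) := by unfold Spec_skip_some_vals; infer_instance

-- ===== CLAIM (what is proved, stated in full; the proofs are below) =====
def Claim_equal_skip_some_vals : Prop := ∀ (x : List Int) (y : List Int) (val_to_skip : Int), Dom_skip_some_vals x y val_to_skip → Spec_skip_some_vals x y val_to_skip (skip_some_vals x y val_to_skip)

-- ===== LEMMAS AND PROOFS =====

-- canonical description of the segmentation: the list of (x-seg, y-seg) pairs,
-- with a pending current segment (cx, cy)
def segsFrom (v : Int) (cx cy : List Int) : List (Int × Int) → List (List Int × List Int)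
  | [] => if cx ≠ [] then [(cx, cy)] else []
  | (a, b) :: t =>
    if b ≠ v then segsFrom v (cx ++ [a]) (cy ++ [b]) t
    else (if cx ≠ [] then [(cx, cy)] else []) ++ segsFrom v [] [] t

theorem loopA_eq (v : Int) (zs : List (Int × Int)) : ∀ xs ys cx cy,
    skipLoopA v zs xs ys cx cy =
      [xs ++ (segsFrom v cx cy zs).map Prod.fst, ys ++ (segsFrom v cx cy zs).map Prod.snd] := by
  induction zs with
  | nil =>
    intro xs ys cx cy
    by_cases h : cx = [] <;> simp [skipLoopA, segsFrom, h]
  | cons p t ih =>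
    intro xs ys cx cy
    obtain ⟨a, b⟩ := p
    by_cases hb : b = v
    · by_cases hc : cx = [] <;>
        simp [skipLoopA, segsFrom, hb, hc, ih, List.append_assoc]
    · simp [skipLoopA, segsFrom, hb, ih]

theorem accTrue (v : Int) (run : List (Int × Int)) (hrun : ∀ p ∈ run, p.2 ≠ v) :
    ∀ cx cy t, segsFrom v cx cy (run ++ t) =
      segsFrom v (cx ++ run.map Prod.fst) (cy ++ run.map Prod.snd) t := by
  induction run with
  | nil => intro cx cy t; simp
  | cons p r ih =>
    intro cx cy t
    obtain ⟨a, b⟩ := p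
    have hb : b ≠ v := hrun (a, b) (by simp)
    have := ih (fun q hq => hrun q (by simp [hq]))
    simp [segsFrom, hb, this, List.append_assoc]

theorem filterFalseHead (key : Int × Int → Bool) (p : Int × Int) (ps : List (Int × Int))
    (hp : key p = false) :
    (groupRuns key (p :: ps)).filter (fun g => g.1) =
      (groupRuns key ps).filter (fun g => g.1) := by
  rw [groupRuns]
  cases ps with
  | nil => simp [hp, groupRuns]
  | cons q r =>
    by_cases hq : key q = false
    · rw [groupRuns]
      simp [hp, hq, List.takeWhile, List.dropWhile]
    · have hq' : key q = true := by simpa using hq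
      simp [hp, hq', List.takeWhile, List.dropWhile]

theorem segs_eq_groups (v : Int) : ∀ (n : Nat) (zs : List (Int × Int)), zs.length ≤ n →
    segsFrom v [] [] zs =
      ((groupRuns (fun p => p.2 != v) zs).filter (fun g => g.1)).map
        (fun g => (g.2.map Prod.fst, g.2.map Prod.snd)) := by
  intro n
  induction n with
  | zero =>
    intro zs h
    have : zs = [] := by cases zs <;> simp_all
    subst this
    simp [segsFrom, groupRuns]
  | succ n ih =>
    intro zs h
    match zs with
    | [] => simp [segsFrom, groupRuns]
    | (a, b) :: ps =>
      by_cases hb : b = v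
      · -- false key: A drops the element (empty pending), B's group is filtered out
        have h1 : segsFrom v [] [] ((a, b) :: ps) = segsFrom v [] [] ps := by
          simp [segsFrom, hb]
        rw [h1, filterFalseHead _ _ _ (by simp [hb])]
        exact ih ps (by simpa using Nat.le_of_succ_le_succ h)
      · -- true key: the run (a,b)::takeWhile … becomes the next segment
        set key : Int × Int → Bool := fun p => p.2 != v with hkey
        have hkab : key (a, b) = true := by simp [hkey, hb]
        set run := ps.takeWhile (fun q => key q == key (a, b)) with hrun
        set rest := ps.dropWhile (fun q => key q == key (a, b)) with hrest
        have hsplit : run ++ rest = ps := List.takeWhile_append_dropWhile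
        have hrunT : ∀ p ∈ run, p.2 ≠ v := by
          intro p hp
          have h5 : (b != v) = true := by simp [hb]
          simpa [hkey, h5] using List.mem_takeWhile_imp hp
        have h2 : segsFrom v [] [] ((a, b) :: ps) =
            segsFrom v (a :: run.map Prod.fst) (b :: run.map Prod.snd) rest := by
          rw [segsFrom, if_pos hb, ← hsplit, accTrue v run hrunT]
          simp
        have hG : groupRuns key ((a, b) :: ps) = (true, (a, b) :: run) :: groupRuns key rest := by
          rw [groupRuns, ← hrun, ← hrest, hkab]
        cases hre : rest with
        | nil =>
          rw [h2, hre, hG, hre]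
          simp [segsFrom, groupRuns]
        | cons cd r =>
          obtain ⟨c, d⟩ := cd
          have hd : key (c, d) = false := by
            have := List.head?_dropWhile_not (fun q => key q == key (a, b)) ps
            rw [← hrest, hre] at this
            simp [hkab] at this
            simp [this]
          have hdv : d = v := by
            simp [hkey, bne] at hd
            exact hd
          have hlen : r.length ≤ n := by
            have h' : ps.length ≤ n := by simpa using h
            have h3 : rest.length ≤ ps.length := hrest ▸ List.length_dropWhile_le _ _
            rw [hre] at h3
            simp at h3
            omega
          rw [h2, hre]
          have h4 : segsFrom v (a :: run.map Prod.fst) (b :: run.map Prod.snd) ((c, d) :: r) =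
              (a :: run.map Prod.fst, b :: run.map Prod.snd) :: segsFrom v [] [] r := by
            simp [segsFrom, hdv]
          rw [h4, hG, hre, ih r hlen]
          rw [← filterFalseHead key (c, d) r hd]
          simp

theorem skip_some_vals_eq_canon (x y : List Int) (v : Int) :
    skip_some_vals x y v =
      [(segsFrom v [] [] (x.zip y)).map Prod.fst, (segsFrom v [] [] (x.zip y)).map Prod.snd] := by
  simp [skip_some_vals, loopA_eq]

theorem skip_some_vals_alt_eq_canon (x y : List Int) (v : Int) :
    skip_some_vals_alt x y v =
      [(segsFrom v [] [] (x.zip y)).map Prod.fst, (segsFrom v [] [] (x.zip y)).map Prod.snd] := by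
  rw [skip_some_vals_alt]
  rw [segs_eq_groups v (x.zip y).length (x.zip y) le_rfl]
  simp [Function.comp]

-- ===== VERDICT (by name: the statement is the Claim_ definition above) =====
theorem skip_some_vals_spec : Claim_equal_skip_some_vals := by
  intro x y v _
  unfold Spec_skip_some_vals
  rw [skip_some_vals_eq_canon, skip_some_vals_alt_eq_canon]
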